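-- pv_equiv track=rewrite | github.com/InstiSher/DiscordBotCleverGuy | mainTg.py | Bigger1990
-- ===== SOURCE A (Python) =====
-- def Bigger1990(lyrics):
--     dict_lyrics = {
--         'lyrics': '',
--         'lyrics2': '',
--     }
--     count = 0
--     flag = 0
--     x = 0
--     for i in lyrics['lyrics']:
--         if count < 1990 and flag == 0:
--             dict_lyrics['lyrics'] = dict_lyrics['lyrics'] + i  # После 1900 найти \n и после как нашлось изменить флаг на lyrics2
--             if count > 1900 and i == '\n':  # Да, это один символ
--                 x = count + 1990
--                 flag += 1
--         elif count < x and flag == 1: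
--             dict_lyrics['lyrics2'] = dict_lyrics['lyrics2'] + i
--         count += 1
--     return dict_lyrics
-- ===== SOURCE B (Python) =====
-- def Bigger1990(lyrics):
--     s = lyrics['lyrics']
--     c = s.find('\n', 1901)
--     if c != -1 and c < 1990:
--         return {'lyrics': s[:c + 1], 'lyrics2': s[c + 1:c + 1990]}
--     return {'lyrics': s[:1990], 'lyrics2': ''}
-- ===== Notes on version B (the rewrite author's own statement) =====
-- stated objective: simpler
-- what changed: Replaced the per-character flag/count/x state machine that concatenates characters one by one with a direct computation of the split point: one str.find('\n', 1901) and two slices.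
import Mathlib
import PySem

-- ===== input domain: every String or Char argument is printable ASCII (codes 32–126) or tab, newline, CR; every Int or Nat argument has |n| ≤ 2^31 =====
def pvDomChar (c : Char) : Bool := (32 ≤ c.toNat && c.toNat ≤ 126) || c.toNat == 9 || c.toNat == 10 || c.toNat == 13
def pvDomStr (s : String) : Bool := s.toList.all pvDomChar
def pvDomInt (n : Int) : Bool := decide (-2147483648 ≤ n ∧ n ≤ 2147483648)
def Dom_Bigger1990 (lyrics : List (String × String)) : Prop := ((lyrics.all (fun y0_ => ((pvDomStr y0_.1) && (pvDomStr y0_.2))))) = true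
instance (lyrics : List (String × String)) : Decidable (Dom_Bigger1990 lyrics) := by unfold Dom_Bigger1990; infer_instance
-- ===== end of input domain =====

-- B replaces A's per-character flag/count/x state machine by one find('\n', 1901) plus two
-- slices (objective: simpler; return value only — neither version mutates its argument).

-- ===== PORT A =====
-- A's for-loop over the characters; state = the two dict values (as char lists) and count/flag/x.
def Bigger1990Loop (cs : List Char) (l1 l2 : List Char) (count flag x : Int) : List Char × List Char :=
  match cs with
  | [] => (l1, l2)
  | i :: rest =>
    if count < 1990 ∧ flag = 0 then
      if count > 1900 ∧ i = '\n' then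
        Bigger1990Loop rest (l1 ++ [i]) l2 (count + 1) (flag + 1) (count + 1990)
      else
        Bigger1990Loop rest (l1 ++ [i]) l2 (count + 1) flag x
    else if count < x ∧ flag = 1 then
      Bigger1990Loop rest l1 (l2 ++ [i]) (count + 1) flag x
    else
      Bigger1990Loop rest l1 l2 (count + 1) flag x

def Bigger1990 (lyrics : List (String × String)) : List (String × String) :=
  match (PySem.Dict.mk lyrics).get? "lyrics" with
  | none => [("lyrics", ""), ("lyrics2", "")]   -- Python raises KeyError here; excluded by Pre_
  | some s =>
    match Bigger1990Loop s.toList [] [] 0 0 0 with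
    | (l1, l2) => [("lyrics", String.ofList l1), ("lyrics2", String.ofList l2)]

-- ===== PORT B =====
def Bigger1990_alt (lyrics : List (String × String)) : List (String × String) :=
  match (PySem.Dict.mk lyrics).get? "lyrics" with
  | none => [("lyrics", ""), ("lyrics2", "")]   -- Python raises KeyError here; excluded by Pre_
  | some s =>
    let c := PySem.Str.findFrom s "\n" 1901 none
    if c ≠ -1 ∧ c < 1990 then
      [("lyrics", PySem.Str.slice s none (some (c + 1))),
       ("lyrics2", PySem.Str.slice s (some (c + 1)) (some (c + 1990)))]
    else
      [("lyrics", PySem.Str.slice s none (some 1990)), ("lyrics2", "")]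

-- ===== PRECONDITION & SPEC =====
-- Pre_ excludes exactly the dicts without a "lyrics" key, on which Python A raises KeyError.
def Pre_Bigger1990 (lyrics : List (String × String)) : Prop :=
  (PySem.Dict.mk lyrics).contains "lyrics" = true
instance (lyrics : List (String × String)) : Decidable (Pre_Bigger1990 lyrics) := by
  unfold Pre_Bigger1990; infer_instance

def pvWitness_Bigger1990 : (List (String × String)) := [("lyrics", "la la la")]

def Spec_Bigger1990 (lyrics : List (String × String)) (out : List (String × String)) : Prop := out = Bigger1990_alt lyrics
instance (lyrics : List (String × String)) (out : List (String × String)) : Decidable (Spec_Bigger1990 lyrics out) := by unfold Spec_Bigger1990; infer_instance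

-- ===== CLAIM (what is proved, stated in full; the proofs are below) =====
def Claim_equal_Bigger1990 : Prop := ∀ (lyrics : List (String × String)), Dom_Bigger1990 lyrics → Pre_Bigger1990 lyrics → Spec_Bigger1990 lyrics (Bigger1990 lyrics)

-- ===== LEMMAS AND PROOFS =====

-- One-step unfolding of the loop on a cons cell.
theorem loop_cons (i : Char) (rest l1 l2 : List Char) (count flag x : Int) :
    Bigger1990Loop (i :: rest) l1 l2 count flag x =
      (if count < 1990 ∧ flag = 0 then
        if count > 1900 ∧ i = '\n' then
          Bigger1990Loop rest (l1 ++ [i]) l2 (count + 1) (flag + 1) (count + 1990)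
        else
          Bigger1990Loop rest (l1 ++ [i]) l2 (count + 1) flag x
      else if count < x ∧ flag = 1 then
        Bigger1990Loop rest l1 (l2 ++ [i]) (count + 1) flag x
      else
        Bigger1990Loop rest l1 l2 (count + 1) flag x) := rfl

-- Once count ≥ 1990 with flag = 0 the loop changes nothing.
theorem loop_stable0 (cs : List Char) : ∀ (l1 l2 : List Char) (count x : Int),
    1990 ≤ count → Bigger1990Loop cs l1 l2 count 0 x = (l1, l2) := by
  induction cs with
  | nil => intro l1 l2 count x _; rfl
  | cons i rest ih =>
    intro l1 l2 count x h
    rw [loop_cons, if_neg (fun hc => absurd hc.1 (by omega)),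
        if_neg (fun hc => absurd hc.2 (by norm_num))]
    exact ih l1 l2 (count + 1) x (by omega)

-- Once count ≥ x with flag = 1 the loop changes nothing.
theorem loop_stable1 (cs : List Char) : ∀ (l1 l2 : List Char) (count x : Int),
    x ≤ count → Bigger1990Loop cs l1 l2 count 1 x = (l1, l2) := by
  induction cs with
  | nil => intro l1 l2 count x _; rfl
  | cons i rest ih =>
    intro l1 l2 count x h
    rw [loop_cons, if_neg (fun hc => absurd hc.2 (by norm_num)),
        if_neg (fun hc => absurd hc.1 (by omega))]
    exact ih l1 l2 (count + 1) x (by omega)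

-- With flag = 1 and count < x the loop appends the next (x - count) characters to l2.
theorem loop_phase1 (cs : List Char) : ∀ (l1 l2 : List Char) (count x : Int),
    count < x →
    Bigger1990Loop cs l1 l2 count 1 x = (l1, l2 ++ cs.take (x - count).toNat) := by
  induction cs with
  | nil => intro l1 l2 count x _; simp [Bigger1990Loop]
  | cons i rest ih =>
    intro l1 l2 count x h
    rw [loop_cons, if_neg (fun hc => absurd hc.2 (by norm_num)), if_pos ⟨h, rfl⟩]
    by_cases hx : count + 1 < x
    · rw [ih l1 (l2 ++ [i]) (count + 1) x hx]
      have hsucc : (x - count).toNat = (x - (count + 1)).toNat + 1 := by omega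
      rw [hsucc]
      simp [List.take_succ_cons]
    · rw [loop_stable1 rest l1 (l2 ++ [i]) (count + 1) x (by omega)]
      have h1 : (x - count).toNat = 1 := by omega
      rw [h1]
      simp

-- Characters strictly before idxOf are not the sought one.
theorem ne_of_lt_idxOf (a : Char) : ∀ (l : List Char) (j : Nat), j < l.idxOf a →
    ∀ (hj : j < l.length), l[j] ≠ a := by
  intro l
  induction l with
  | nil => intro j _ hj; simp at hj
  | cons b t ih =>
    intro j hlt hj
    by_cases hb : b = a
    · subst hb; rw [List.idxOf_cons_self] at hlt; omega
    · rw [List.idxOf_cons_ne t hb] at hlt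
      cases j with
      | zero => simpa using hb
      | succ k => simpa using ih k (by omega) (by simpa using hj)

theorem singleton_prefix_iff_head? (a : Char) (l : List Char) : [a] <+: l ↔ l.head? = some a := by
  constructor
  · rintro ⟨t, rfl⟩; rfl
  · intro h; cases l with
    | nil => simp at h
    | cons b t => simp at h; subst h; exact ⟨t, rfl⟩

theorem singleton_infix_iff_mem (a : Char) (l : List Char) : [a] <:+: l ↔ a ∈ l := by
  constructor
  · rintro ⟨s, t, rfl⟩; simp
  · intro h; obtain ⟨s, t, rfl⟩ := List.append_of_mem h; exact ⟨s, t, by simp⟩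

-- s.find(ch) for a single character is the first index of that character (or -1).
theorem find_singleton (cs : List Char) (a : Char) :
    PySem.Chars.find cs [a] = if a ∈ cs then ((cs.idxOf a : Nat) : Int) else -1 := by
  by_cases hm : a ∈ cs
  · have hinf : [a] <:+: cs := (singleton_infix_iff_mem a cs).mpr hm
    have h0 : 0 ≤ PySem.Chars.find cs [a] := (PySem.Chars.find_nonneg_iff cs [a]).mpr hinf
    obtain ⟨hpre, hmin⟩ := PySem.Chars.find_spec h0
    set g := (PySem.Chars.find cs [a]).toNat with hg
    have hga : cs[g]? = some a := by
      have h1 := (singleton_prefix_iff_head? a _).mp hpre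
      rwa [List.head?_drop] at h1
    obtain ⟨hglen, hgval⟩ := List.getElem?_eq_some_iff.mp hga
    have hle1 : cs.idxOf a ≤ g := by
      by_contra hlt
      exact ne_of_lt_idxOf a cs g (by omega) hglen hgval
    have hidxlen : cs.idxOf a < cs.length := lt_of_le_of_lt hle1 hglen
    have hle2 : g ≤ cs.idxOf a := by
      by_contra hlt
      apply hmin (cs.idxOf a) (by omega)
      rw [singleton_prefix_iff_head? a _, List.head?_drop]
      exact List.getElem?_eq_some_iff.mpr ⟨hidxlen, List.getElem_idxOf hidxlen⟩
    have hgi : g = cs.idxOf a := le_antisymm hle2 hle1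
    rw [if_pos hm, ← hgi, hg, Int.toNat_of_nonneg h0]
  · rw [if_neg hm, (PySem.Chars.find_eq_neg_one_iff cs [a]).mpr]
    rw [singleton_infix_iff_mem]
    exact hm

-- In the window 1901 ≤ count ≤ 1990 (flag = 0, x = 0) the loop's value is decided by the
-- first newline of the remaining characters.
theorem loop_phase0 (cs : List Char) : ∀ (count : Nat) (l1 : List Char),
    1901 ≤ count → count ≤ 1990 →
    Bigger1990Loop cs l1 [] (count : Int) 0 0 =
      (if '\n' ∈ cs ∧ count + cs.idxOf '\n' < 1990
       then (l1 ++ cs.take (cs.idxOf '\n' + 1), (cs.drop (cs.idxOf '\n' + 1)).take 1989)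
       else (l1 ++ cs.take (1990 - count), [])) := by
  induction cs with
  | nil => intro count l1 _ _; simp [Bigger1990Loop]
  | cons i rest ih =>
    intro count l1 hlo hhi
    by_cases h90 : count < 1990
    · rw [loop_cons, if_pos ⟨by omega, rfl⟩]
      by_cases hnl : i = '\n'
      · subst hnl
        rw [if_pos ⟨by omega, rfl⟩]
        rw [show (0 : Int) + 1 = 1 by norm_num]
        rw [loop_phase1 rest (l1 ++ ['\n']) [] ((count : Int) + 1) ((count : Int) + 1990) (by omega)]
        rw [if_pos ⟨by simp, by rw [List.idxOf_cons_self]; omega⟩]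
        have h89 : (((count : Int) + 1990) - ((count : Int) + 1)).toNat = 1989 := by omega
        rw [h89, List.idxOf_cons_self]
        simp
      · rw [if_neg (fun hc => hnl hc.2)]
        rw [show ((count : Nat) : Int) + 1 = (((count + 1 : Nat)) : Int) by push_cast; ring]
        rw [ih (count + 1) (l1 ++ [i]) (by omega) (by omega)]
        have hidx : (i :: rest).idxOf '\n' = rest.idxOf '\n' + 1 := by
          simpa using List.idxOf_cons_ne rest hnl
        have hmem : ('\n' ∈ i :: rest) ↔ ('\n' ∈ rest) := by
          constructor
          · intro hmm
            rcases List.mem_cons.mp hmm with h' | h'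
            · exact absurd h'.symm hnl
            · exact h'
          · exact fun hmm => List.mem_cons_of_mem _ hmm
        by_cases hcond : '\n' ∈ rest ∧ (count + 1) + rest.idxOf '\n' < 1990
        · rw [if_pos hcond, if_pos ⟨hmem.mpr hcond.1, by rw [hidx]; omega⟩, hidx]
          simp [List.take_succ_cons, List.drop_succ_cons]
        · rw [if_neg hcond,
              if_neg (fun hc => hcond ⟨hmem.mp hc.1, by rw [hidx] at hc; omega⟩)]
          have hsub : 1990 - count = (1990 - (count + 1)) + 1 := by omega
          rw [hsub]
          simp [List.take_succ_cons]
    · have hce : count = 1990 := by omega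
      subst hce
      rw [loop_cons, if_neg (fun hc => absurd hc.1 (by omega)),
          if_neg (fun hc => absurd hc.2 (by norm_num))]
      rw [loop_stable0 rest l1 [] (((1990 : Nat) : Int) + 1) 0 (by omega)]
      rw [if_neg (fun hc => absurd hc.2 (by omega))]
      simp

-- The first 1901 characters (flag = 0, x = 0, count starting below 1901) are copied verbatim.
theorem loop_pre : ∀ (k : Nat) (cs : List Char) (count : Nat) (l1 : List Char),
    count + k = 1901 →
    Bigger1990Loop cs l1 [] (count : Int) 0 0 =
      Bigger1990Loop (cs.drop k) (l1 ++ cs.take k) [] ((1901 : Nat) : Int) 0 0 := by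
  intro k
  induction k with
  | zero => intro cs count l1 h; simp [show count = 1901 by omega]
  | succ k ih =>
    intro cs count l1 h
    cases cs with
    | nil => simp [Bigger1990Loop]
    | cons i rest =>
      rw [loop_cons, if_pos ⟨by omega, rfl⟩, if_neg (fun hc => absurd hc.1 (by omega))]
      rw [show ((count : Nat) : Int) + 1 = (((count + 1 : Nat)) : Int) by push_cast; ring]
      rw [ih rest (count + 1) (l1 ++ [i]) (by omega)]
      simp [List.take_succ_cons, List.drop_succ_cons]

-- findFrom with start past the end of the string is -1.
theorem findFrom_past_end (cs : List Char) (h : cs.length < 1901) :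
    PySem.Chars.findFrom cs ['\n'] 1901 none = -1 := by
  simp [PySem.Chars.findFrom]
  intro h1
  exfalso
  omega

-- The whole state machine equals find + slices, at the level of character lists.
theorem core_eq (cs : List Char) :
    Bigger1990Loop cs [] [] 0 0 0 =
      (if PySem.Chars.findFrom cs ['\n'] 1901 none ≠ -1 ∧
          PySem.Chars.findFrom cs ['\n'] 1901 none < 1990
       then (PySem.Chars.slice cs none (some (PySem.Chars.findFrom cs ['\n'] 1901 none + 1)),
             PySem.Chars.slice cs (some (PySem.Chars.findFrom cs ['\n'] 1901 none + 1))
                                 (some (PySem.Chars.findFrom cs ['\n'] 1901 none + 1990)))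
       else (PySem.Chars.slice cs none (some 1990), [])) := by
  have hA := loop_pre 1901 cs 0 [] (by norm_num)
  rw [List.nil_append] at hA
  push_cast at hA
  rw [hA]
  have hB := loop_phase0 (cs.drop 1901) 1901 (cs.take 1901) (by norm_num) (by norm_num)
  push_cast at hB
  rw [hB]
  have helse : List.take 1901 cs ++ List.take 89 (List.drop 1901 cs) =
      PySem.Chars.slice cs none (some 1990) := by
    simp only [PySem.Chars.slice_eq_listSlice]
    rw [show (1990 : Int) = ((1990 : Nat) : Int) by norm_num]
    rw [PySem.List.slice_to_natCast]
    rw [show (1990 : Nat) = 1901 + 89 by norm_num]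
    rw [List.take_add]
  by_cases hlen : 1901 ≤ cs.length
  · have hff := PySem.Chars.findFrom_natCast cs ['\n'] 1901 (by omega)
    push_cast at hff
    rw [hff, find_singleton]
    by_cases hm : '\n' ∈ cs.drop 1901
    · rw [if_pos hm]
      set idx := (cs.drop 1901).idxOf '\n'
      rw [if_neg (by omega : ¬((idx : Int) = -1))]
      by_cases hwin : 1901 + idx < 1990
      · rw [if_pos ⟨hm, hwin⟩, if_pos ⟨by omega, by omega⟩]
        refine Prod.ext ?_ ?_
        · simp only [PySem.Chars.slice_eq_listSlice]
          rw [show (1901 : Int) + (idx : Int) + 1 = (((1902 + idx : Nat)) : Int) by push_cast; ring]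
          rw [PySem.List.slice_to_natCast]
          rw [show (1902 + idx : Nat) = 1901 + (idx + 1) by omega]
          rw [← List.take_add]
        · simp only [PySem.Chars.slice_eq_listSlice]
          rw [show (1901 : Int) + (idx : Int) + 1 = (((1902 + idx : Nat)) : Int) by push_cast; ring]
          rw [show (1901 : Int) + (idx : Int) + 1990 = (((3891 + idx : Nat)) : Int) by push_cast; ring]
          rw [PySem.List.slice_natCast]
          rw [show (3891 + idx) - (1902 + idx) = 1989 by omega]
          rw [List.drop_drop]
          rw [show 1901 + (idx + 1) = 1902 + idx by omega]
      · rw [if_neg (fun hc => absurd hc.2 (by omega)),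
            if_neg (by intro hc; omega)]
        rw [helse]
    · rw [if_neg hm, if_pos rfl]
      rw [if_neg (fun hc => absurd hc.1 hm), if_neg (fun hc => hc.1 rfl)]
      rw [helse]
  · have hdrop : cs.drop 1901 = [] := List.drop_eq_nil_of_le (by omega)
    rw [findFrom_past_end cs (by omega)]
    rw [if_neg (fun hc => by simp [hdrop] at hc), if_neg (by norm_num)]
    rw [helse]

-- Str.slice is ofList of the Chars slice.
theorem str_slice_ofList (s : String) (a? b? : Option Int) :
    PySem.Str.slice s a? b? = String.ofList (PySem.Chars.slice s.toList a? b?) := by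
  rw [← String.ofList_toList (s := PySem.Str.slice s a? b?), PySem.Str.toList_slice]

-- ===== VERDICT (by name: the statement is the Claim_ definition above) =====
theorem Bigger1990_spec : Claim_equal_Bigger1990 := by
  unfold Claim_equal_Bigger1990 Spec_Bigger1990
  intro lyrics _ hpre
  unfold Bigger1990 Bigger1990_alt
  cases hget : (PySem.Dict.mk lyrics).get? "lyrics" with
  | none =>
    exfalso
    unfold Pre_Bigger1990 at hpre
    rw [PySem.Dict.contains_eq_isSome_get?, hget] at hpre
    simp at hpre
  | some s =>
    have hnl : ("\n" : String).toList = ['\n'] := by decide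
    dsimp only
    simp only [PySem.Str.findFrom_eq, hnl]
    rw [core_eq s.toList]
    by_cases hc : PySem.Chars.findFrom s.toList ['\n'] 1901 none ≠ -1 ∧
        PySem.Chars.findFrom s.toList ['\n'] 1901 none < 1990
    · rw [if_pos hc, if_pos hc]
      dsimp only
      simp only [str_slice_ofList]
    · rw [if_neg hc, if_neg hc]
      dsimp only
      simp only [str_slice_ofList]
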